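-- pv_equiv track=rewrite | github.com/MohsinMalik2/resume-reviewer | backend/app/agents/execution_agent.py | _determine_escalation_priority
-- ===== SOURCE A (Python) =====
-- from typing import Dict, Any, List
--
-- def _determine_escalation_priority(reasons: List[str]) -> str:
--     """Determine escalation priority based on reasons"""
--     if any("exceptional" in reason.lower() for reason in reasons):
--         return "high"
--     elif any("red flag" in reason.lower() for reason in reasons):
--         return "high"
--     elif any("borderline" in reason.lower() for reason in reasons):
--         return "medium"
--     else:
--         return "low"
-- ===== SOURCE B (Python) =====
-- def _determine_escalation_priority(reasons):
--     """Determine escalation priority based on reasons (single pass over reasons)."""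
--     saw_high = False
--     saw_medium = False
--     for reason in reasons:
--         low = reason.lower()
--         if "exceptional" in low or "red flag" in low:
--             saw_high = True
--         if "borderline" in low:
--             saw_medium = True
--     if saw_high:
--         return "high"
--     if saw_medium:
--         return "medium"
--     return "low"
-- ===== Notes on version B (the rewrite author's own statement) =====
-- stated objective: faster
-- what changed: Replaces A's three independent any()-scans (each lowercasing every string again) with one pass that lowercases each reason once and accumulates two boolean flags, deciding the priority after the loop.
import Mathlib
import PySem

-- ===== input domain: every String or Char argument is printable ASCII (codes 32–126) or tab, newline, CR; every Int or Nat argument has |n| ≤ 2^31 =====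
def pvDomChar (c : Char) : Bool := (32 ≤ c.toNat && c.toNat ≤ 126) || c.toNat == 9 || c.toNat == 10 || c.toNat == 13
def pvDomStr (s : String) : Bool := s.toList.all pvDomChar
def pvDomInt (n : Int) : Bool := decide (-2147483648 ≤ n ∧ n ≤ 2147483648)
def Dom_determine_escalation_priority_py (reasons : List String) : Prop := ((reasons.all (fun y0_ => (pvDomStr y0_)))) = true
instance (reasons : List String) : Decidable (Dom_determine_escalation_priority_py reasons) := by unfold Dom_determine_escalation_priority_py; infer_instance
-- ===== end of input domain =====

-- B replaces A's three any() scans with one pass accumulating two flags (alternative decomposition; return value only).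
-- ===== PORT A =====
def determine_escalation_priority_py (reasons : List String) : String :=
  if reasons.any (fun reason => PySem.Str.isIn "exceptional" (PySem.Str.lower reason)) then "high"
  else if reasons.any (fun reason => PySem.Str.isIn "red flag" (PySem.Str.lower reason)) then "high"
  else if reasons.any (fun reason => PySem.Str.isIn "borderline" (PySem.Str.lower reason)) then "medium"
  else "low"

-- ===== PORT B =====
def determine_escalation_priority_py_alt (reasons : List String) : String :=
  let flags := reasons.foldl (fun (f : Bool × Bool) reason =>
      let low := PySem.Str.lower reason
      (f.1 || (PySem.Str.isIn "exceptional" low || PySem.Str.isIn "red flag" low),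
       f.2 || PySem.Str.isIn "borderline" low)) (false, false)
  if flags.1 then "high" else if flags.2 then "medium" else "low"

-- ===== PRECONDITION & SPEC =====
def Spec_determine_escalation_priority_py (reasons : List String) (out : String) : Prop := out = determine_escalation_priority_py_alt reasons
instance (reasons : List String) (out : String) : Decidable (Spec_determine_escalation_priority_py reasons out) := by unfold Spec_determine_escalation_priority_py; infer_instance

-- ===== CLAIM (what is proved, stated in full; the proofs are below) =====
def Claim_equal_determine_escalation_priority_py : Prop := ∀ (reasons : List String), Dom_determine_escalation_priority_py reasons → Spec_determine_escalation_priority_py reasons (determine_escalation_priority_py reasons)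

-- ===== LEMMAS AND PROOFS =====

-- ===== VERDICT (by name: the statement is the Claim_ definition above) =====
theorem pv_foldl_flags (l : List String) (a b : Bool) :
    l.foldl (fun (f : Bool × Bool) reason =>
      let low := PySem.Str.lower reason
      (f.1 || (PySem.Str.isIn "exceptional" low || PySem.Str.isIn "red flag" low),
       f.2 || PySem.Str.isIn "borderline" low)) (a, b)
    = (a || l.any (fun r => PySem.Str.isIn "exceptional" (PySem.Str.lower r) || PySem.Str.isIn "red flag" (PySem.Str.lower r)),
       b || l.any (fun r => PySem.Str.isIn "borderline" (PySem.Str.lower r))) := by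
  induction l generalizing a b with
  | nil => simp
  | cons x xs ih =>
    rw [List.foldl_cons, ih, List.any_cons, List.any_cons]
    refine Prod.ext ?_ ?_ <;> simp [Bool.or_assoc]

theorem pv_any_or (l : List String) (p q : String → Bool) :
    l.any (fun x => p x || q x) = (l.any p || l.any q) := by
  induction l with
  | nil => rfl
  | cons x xs ih => simp [List.any_cons, ih, Bool.or_assoc, Bool.or_left_comm]

theorem determine_escalation_priority_py_spec : Claim_equal_determine_escalation_priority_py := by
  intro reasons _
  unfold Spec_determine_escalation_priority_py determine_escalation_priority_py determine_escalation_priority_py_alt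
  rw [pv_foldl_flags]
  simp only [Bool.false_or, pv_any_or]
  generalize reasons.any (fun r => PySem.Str.isIn "exceptional" (PySem.Str.lower r)) = e
  generalize reasons.any (fun r => PySem.Str.isIn "red flag" (PySem.Str.lower r)) = rf
  generalize reasons.any (fun r => PySem.Str.isIn "borderline" (PySem.Str.lower r)) = bl
  cases e <;> cases rf <;> cases bl <;> rfl
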